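-- pv_equiv track=rewrite | github.com/shiv-kumar-katheriya/Hacker_Rank_Codes | problem solving/Game of two stacks.py | twoStacks
-- ===== SOURCE A (Python) =====
-- def twoStacks(x, a, k):
--     m1 = []
--     m2 = []
--     c = 0
--     total  = 0
--     for i in a :
--         if total + i <= x:
--             m1.append(i)
--             c += 1
--             total += i
--         else :
--             break
--     count = c
--     i = 0
--     z = len(k)
--     while z > i :
--         if total + k[i]  <= x:
--             m2.append(k[i])
--             c += 1
--             total += k[i]
--             i += 1
--             if count < c:
--                 count = c
--         elif m1!= []:
--             q = m1.pop()
--             total = total - q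
--             if total + k[i]  <= x:
--                 m2.append(k[i])
--                 total += k[i]
--                 i += 1
--             else :
--                 c -= 1
--                 continue
--         else :
--             break
--     return count
-- ===== SOURCE B (Python) =====
-- def twoStacks(x, a, k):
--     # Prefix pass over a: greedy running totals while they stay <= x.
--     sa = [0]
--     for v in a:
--         if sa[-1] + v > x:
--             break
--         sa.append(sa[-1] + v)
--     # Full prefix sums of k.
--     sk = [0]
--     for v in k:
--         sk.append(sk[-1] + v)
--     # Level-by-level scan: for each budget level p (descending), greedily
--     # extend j; j never resets, so the whole scan is linear.
--     best = 0
--     j = 0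
--     for p in range(len(sa) - 1, -1, -1):
--         while j < len(k) and sa[p] + sk[j + 1] <= x:
--             j += 1
--         if p + j > best:
--             best = p + j
--     return best
-- ===== Notes on version B (the rewrite author's own statement) =====
-- stated objective: alternative
-- what changed: Replaces A's stack simulation (mutable stacks with pops, a running total, swap/continue branches inside one j-major while loop) by two prefix-sum passes followed by a p-major level scan: for each budget level p taken from the greedy a-prefix downward, j is greedily extended and p+j recorded; correctness rests on the proved fact that this visits the same (p,j) path as A's pop loop in the other traversal order.
import Mathlib
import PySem

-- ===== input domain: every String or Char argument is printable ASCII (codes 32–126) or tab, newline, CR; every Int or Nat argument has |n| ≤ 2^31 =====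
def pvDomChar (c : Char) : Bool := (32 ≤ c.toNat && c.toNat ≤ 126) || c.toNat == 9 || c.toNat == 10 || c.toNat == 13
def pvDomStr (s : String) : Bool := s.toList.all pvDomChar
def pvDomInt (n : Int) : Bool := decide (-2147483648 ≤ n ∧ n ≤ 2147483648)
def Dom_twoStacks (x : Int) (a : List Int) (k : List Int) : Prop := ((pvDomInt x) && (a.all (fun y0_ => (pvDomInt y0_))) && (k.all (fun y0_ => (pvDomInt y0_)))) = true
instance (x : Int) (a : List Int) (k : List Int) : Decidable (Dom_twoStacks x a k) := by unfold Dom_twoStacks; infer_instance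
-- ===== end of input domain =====

-- B replaces A's stack simulation (mutable stacks, pops, a running total, swap/continue
-- branches in one j-major while loop) by two prefix-sum passes and a p-major level scan
-- (objective: alternative traversal order, same cost).

-- ===== PORT A =====
-- the `for i in a` loop with its break (m1/c/total accumulate)
def twoStacksGreedy (x : Int) : List Int → List Int → Int → Int → List Int × Int × Int
  | [], m1, c, total => (m1, c, total)
  | v :: rest, m1, c, total =>
      if total + v ≤ x then twoStacksGreedy x rest (m1 ++ [v]) (c + 1) (total + v)
      else (m1, c, total)

-- the `while z > i` loop; k[i] is always in range (i < z = len k), ported as getD;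
-- Python's temporaries q = m1.pop() and the updated total are written inline
def twoStacksLoop (x : Int) (k : List Int) (m1 m2 : List Int)
    (c total count : Int) (i : Nat) : Int :=
  if _h : i < k.length then
    if total + k.getD i 0 ≤ x then
      twoStacksLoop x k m1 (m2 ++ [k.getD i 0]) (c + 1) (total + k.getD i 0)
        (if count < c + 1 then c + 1 else count) (i + 1)
    else if _h2 : m1 ≠ [] then
      -- q = m1.pop(); total = total - q
      if total - m1.getLastD 0 + k.getD i 0 ≤ x then
        twoStacksLoop x k m1.dropLast (m2 ++ [k.getD i 0]) c
          (total - m1.getLastD 0 + k.getD i 0) count (i + 1)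
      else
        twoStacksLoop x k m1.dropLast m2 (c - 1) (total - m1.getLastD 0) count i
    else count
  else count
termination_by (k.length - i) + m1.length
decreasing_by
  · omega
  · have : 0 < m1.length := List.length_pos_iff.mpr _h2
    simp [List.length_dropLast]; omega
  · have : 0 < m1.length := List.length_pos_iff.mpr _h2
    simp [List.length_dropLast]; omega

def twoStacks (x : Int) (a : List Int) (k : List Int) : Int :=
  match twoStacksGreedy x a [] 0 0 with
  | (m1, c, total) => twoStacksLoop x k m1 [] c total c 0

-- ===== PORT B =====
-- sa = [0]; for v in a: if sa[-1]+v > x: break; sa.append(sa[-1]+v)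
def altSa (x : Int) : List Int → Int → List Int → List Int
  | [], _, acc => acc
  | v :: rest, lastv, acc =>
      if x < lastv + v then acc else altSa x rest (lastv + v) (acc ++ [lastv + v])

-- sk = [0]; for v in k: sk.append(sk[-1]+v)
def altSk : List Int → Int → List Int → List Int
  | [], _, acc => acc
  | v :: rest, lastv, acc => altSk rest (lastv + v) (acc ++ [lastv + v])

-- the inner `while j < len(k) and sa[p] + sk[j+1] <= x: j += 1`; indices in range, getD
def extendJ (x : Int) (k sa sk : List Int) (p j : Nat) : Nat :=
  if h : j < k.length ∧ sa.getD p 0 + sk.getD (j + 1) 0 ≤ x then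
    extendJ x k sa sk p (j + 1)
  else j
termination_by k.length - j
decreasing_by omega

-- the outer `for p in range(len(sa)-1, -1, -1)` level scan
def pLoop (x : Int) (k sa sk : List Int) (p j : Nat) (best : Int) : Int :=
  let j' := extendJ x k sa sk p j
  let best' := if best < (p : Int) + (j' : Int) then (p : Int) + (j' : Int) else best
  match p with
  | 0 => best'
  | p' + 1 => pLoop x k sa sk p' j' best'

def twoStacks_alt (x : Int) (a : List Int) (k : List Int) : Int :=
  let sa := altSa x a 0 [0]
  let sk := altSk k 0 [0]
  pLoop x k sa sk (sa.length - 1) 0 0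

-- ===== PRECONDITION & SPEC =====
def Spec_twoStacks (x : Int) (a : List Int) (k : List Int) (out : Int) : Prop := out = twoStacks_alt x a k
instance (x : Int) (a : List Int) (k : List Int) (out : Int) : Decidable (Spec_twoStacks x a k out) := by unfold Spec_twoStacks; infer_instance

-- ===== CLAIM (what is proved, stated in full; the proofs are below) =====
def Claim_equal_twoStacks : Prop := ∀ (x : Int) (a : List Int) (k : List Int), Dom_twoStacks x a k → Spec_twoStacks x a k (twoStacks x a k)

-- ===== LEMMAS AND PROOFS =====

-- prefix sums of a list (specification device)
def psums (l : List Int) : List Int := (List.range (l.length + 1)).map (fun i => (l.take i).sum)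

-- abstract value of the phase-1 greedy prefix
def gpre (x : Int) : List Int → List Int → List Int
  | [], m1 => m1
  | v :: rest, m1 => if m1.sum + v ≤ x then gpre x rest (m1 ++ [v]) else m1

-- j-major restatement of A's while loop over prefix sums (proof device bridging the two ports)
def jLoop (x : Int) (k sa sk : List Int) (p j : Nat) (best : Int) : Int :=
  if j < k.length then
    if sa.getD p 0 + sk.getD (j + 1) 0 ≤ x then
      jLoop x k sa sk p (j + 1) (max best ((p : Int) + ((j : Int) + 1)))
    else if 0 < p then
      jLoop x k sa sk (p - 1) j best
    else best
  else best
termination_by (k.length - j) + p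

theorem psums_length (l : List Int) : (psums l).length = l.length + 1 := by
  simp [psums]

theorem psums_snoc (l : List Int) (v : Int) :
    psums (l ++ [v]) = psums l ++ [l.sum + v] := by
  unfold psums
  simp [List.range_succ]
  intro i hi
  rw [List.take_append_of_le_length (by omega)]

theorem psums_getD (l : List Int) (q : Nat) (h : q ≤ l.length) :
    (psums l).getD q 0 = (l.take q).sum := by
  unfold psums
  rw [List.getD_eq_getElem?_getD]
  simp [Nat.lt_succ_of_le h]

theorem sum_take_succ (l : List Int) (q : Nat) (h : q < l.length) :
    (l.take (q + 1)).sum = (l.take q).sum + l.getD q 0 := by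
  rw [List.sum_take_succ _ _ h, List.getD_eq_getElem?_getD, List.getElem?_eq_getElem h]
  rfl

theorem getLastD_take (l : List Int) (p' : Nat) (h : p' + 1 ≤ l.length) :
    (l.take (p' + 1)).getLastD 0 = l.getD p' 0 := by
  rw [← List.take_concat_get (by omega : p' < l.length), List.concat_eq_append,
    List.getLastD_concat, List.getD_eq_getElem?_getD, List.getElem?_eq_getElem (by omega)]
  rfl

theorem dropLast_take (l : List Int) (p' : Nat) (h : p' + 1 ≤ l.length) :
    (l.take (p' + 1)).dropLast = l.take p' := by
  rw [← List.take_concat_get (by omega : p' < l.length), List.concat_eq_append,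
    List.dropLast_concat]

theorem greedy_spec (x : Int) : ∀ (a m1 : List Int),
    twoStacksGreedy x a m1 (m1.length : Int) m1.sum =
      (gpre x a m1, ((gpre x a m1).length : Int), (gpre x a m1).sum) := by
  intro a
  induction a with
  | nil => intro m1; simp [twoStacksGreedy, gpre]
  | cons v rest ih =>
    intro m1
    simp only [twoStacksGreedy, gpre]
    by_cases hc : m1.sum + v ≤ x
    · rw [if_pos hc, if_pos hc]
      have := ih (m1 ++ [v])
      simpa [List.sum_append, add_comm] using this
    · rw [if_neg hc, if_neg hc]

theorem sa_spec (x : Int) : ∀ (a m1 : List Int),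
    altSa x a m1.sum (psums m1) = psums (gpre x a m1) := by
  intro a
  induction a with
  | nil => intro m1; simp [altSa, gpre]
  | cons v rest ih =>
    intro m1
    simp only [altSa, gpre]
    by_cases hc : m1.sum + v ≤ x
    · rw [if_neg (by omega), if_pos hc, ← psums_snoc]
      have := ih (m1 ++ [v])
      simpa [List.sum_append] using this
    · rw [if_pos (by omega), if_neg hc]

theorem sk_spec : ∀ (l m : List Int), altSk l m.sum (psums m) = psums (m ++ l) := by
  intro l
  induction l with
  | nil => intro m; simp [altSk]
  | cons v rest ih =>
    intro m
    simp only [altSk]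
    rw [← psums_snoc]
    have := ih (m ++ [v])
    simpa [List.sum_append] using this

theorem loop_eq (x : Int) (k m0 : List Int) :
    ∀ (n p j : Nat) (best : Int) (m2 : List Int),
      (k.length - j) + p ≤ n → p ≤ m0.length → j ≤ k.length →
      (p : Int) + (j : Int) ≤ best →
      twoStacksLoop x k (m0.take p) m2 ((p : Int) + (j : Int))
          ((m0.take p).sum + (k.take j).sum) best j
        = jLoop x k (psums m0) (psums k) p j best := by
  intro n
  induction n with
  | zero =>
    intro p j best m2 hn hp hj hb
    rw [twoStacksLoop, jLoop, dif_neg (by omega), if_neg (by omega)]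
  | succ n ih =>
    intro p j best m2 hn hp hj hb
    by_cases hjk : j < k.length
    · rw [twoStacksLoop, jLoop, dif_pos hjk, if_pos hjk,
        psums_getD _ _ hp, psums_getD _ _ (by omega), sum_take_succ _ _ hjk, ← add_assoc]
      by_cases hc : (m0.take p).sum + (k.take j).sum + k.getD j 0 ≤ x
      · rw [if_pos hc, if_pos hc,
          show ((p : Int) + (j : Int)) + 1 = (p : Int) + ((j : Nat) + 1 : Nat) from by
            push_cast; ring,
          show (m0.take p).sum + (k.take j).sum + k.getD j 0
              = (m0.take p).sum + (k.take (j + 1)).sum from by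
            rw [sum_take_succ _ _ hjk]; ring,
          show (if best < (p : Int) + (((j : Nat) + 1 : Nat) : Int) then
                  (p : Int) + (((j : Nat) + 1 : Nat) : Int) else best)
              = max best ((p : Int) + ((j : Int) + 1)) from by
            push_cast; split_ifs <;> omega]
        exact ih p (j + 1) _ (m2 ++ [k.getD j 0]) (by omega) hp (by omega) (by push_cast; omega)
      · rw [if_neg hc, if_neg hc]
        by_cases hp0 : 0 < p
        · obtain ⟨p', rfl⟩ : ∃ p', p = p' + 1 := ⟨p - 1, by omega⟩
          rw [dif_pos (by apply List.ne_nil_of_length_pos; simp; omega), if_pos hp0,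
            getLastD_take _ _ hp, dropLast_take _ _ hp]
          have hsum : (m0.take (p' + 1)).sum = (m0.take p').sum + m0.getD p' 0 :=
            sum_take_succ _ _ (by omega)
          have e1 : (m0.take (p' + 1)).sum + (k.take j).sum - m0.getD p' 0
              = (m0.take p').sum + (k.take j).sum := by rw [hsum]; ring
          rw [show (p' + 1 - 1) = p' from rfl, e1]
          by_cases hc2 : (m0.take p').sum + (k.take j).sum + k.getD j 0 ≤ x
          · rw [if_pos hc2,
              jLoop, if_pos hjk, psums_getD _ _ (by omega : p' ≤ m0.length),
              psums_getD _ _ (by omega), sum_take_succ _ _ hjk, ← add_assoc, if_pos hc2,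
              show ((p' + 1 : Nat) : Int) + (j : Int) = (p' : Int) + ((j : Nat) + 1 : Nat) from by
                push_cast; ring,
              show (m0.take p').sum + (k.take j).sum + k.getD j 0
                  = (m0.take p').sum + (k.take (j + 1)).sum from by
                rw [sum_take_succ _ _ hjk]; ring,
              max_eq_left (by push_cast at hb ⊢; omega)]
            exact ih p' (j + 1) best (m2 ++ [k.getD j 0]) (by omega) (by omega) (by omega)
              (by push_cast at hb ⊢; omega)
          · rw [if_neg hc2,
              show ((p' + 1 : Nat) : Int) + (j : Int) - 1 = (p' : Int) + (j : Int) from by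
                push_cast; ring]
            exact ih p' j best m2 (by omega) (by omega) (by omega) (by push_cast at hb ⊢; omega)
        · have hp' : p = 0 := by omega
          subst hp'
          rw [dif_neg (by simp), if_neg (by omega)]
    · rw [twoStacksLoop, jLoop, dif_neg (by omega), if_neg (by omega)]

theorem extendJ_ge (x : Int) (k sa sk : List Int) (p : Nat) :
    ∀ (n j : Nat), k.length - j ≤ n → j ≤ extendJ x k sa sk p j := by
  intro n
  induction n with
  | zero =>
    intro j h
    rw [extendJ]
    split_ifs with hc
    · omega
    · exact le_refl j
  | succ n ih =>
    intro j h
    rw [extendJ]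
    split_ifs with hc
    · have := ih (j + 1) (by omega)
      omega
    · exact le_refl j

theorem extendJ_stop (x : Int) (k sa sk : List Int) (p j : Nat)
    (h : ¬ (j < k.length ∧ sa.getD p 0 + sk.getD (j + 1) 0 ≤ x)) :
    extendJ x k sa sk p j = j := by
  rw [extendJ, dif_neg h]

-- one-step unfolding of pLoop with the p-match flattened into an if
theorem pLoop_unfold (x : Int) (k sa sk : List Int) (p j : Nat) (best : Int) :
    pLoop x k sa sk p j best =
      if p = 0 then
        (if best < (p : Int) + ((extendJ x k sa sk p j : Nat) : Int)
         then (p : Int) + ((extendJ x k sa sk p j : Nat) : Int) else best)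
      else
        pLoop x k sa sk (p - 1) (extendJ x k sa sk p j)
          (if best < (p : Int) + ((extendJ x k sa sk p j : Nat) : Int)
           then (p : Int) + ((extendJ x k sa sk p j : Nat) : Int) else best) := by
  cases p with
  | zero => simp [pLoop]
  | succ p' => simp [pLoop]

theorem pLoop_const (x : Int) (k sa sk : List Int) :
    ∀ (p j : Nat) (best : Int), k.length ≤ j → (p : Int) + (j : Int) ≤ best →
      pLoop x k sa sk p j best = best := by
  intro p
  induction p with
  | zero =>
    intro j best hj hb
    rw [pLoop_unfold, if_pos rfl, extendJ_stop x k sa sk 0 j (by omega),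
      if_neg (by push_cast at hb ⊢; omega)]
  | succ p' ih =>
    intro j best hj hb
    rw [pLoop_unfold, if_neg (by omega : ¬ p' + 1 = 0), extendJ_stop x k sa sk (p' + 1) j (by omega),
      if_neg (by push_cast at hb ⊢; omega)]
    exact ih j best hj (by push_cast at hb ⊢; omega)

-- advancing j by one inside the fit case leaves pLoop unchanged
theorem pLoop_shift (x : Int) (k sa sk : List Int) (p j : Nat) (best : Int)
    (h1 : j < k.length) (h2 : sa.getD p 0 + sk.getD (j + 1) 0 ≤ x) :
    pLoop x k sa sk p (j + 1) (max best ((p : Int) + ((j : Int) + 1)))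
      = pLoop x k sa sk p j best := by
  have hj : extendJ x k sa sk p j = extendJ x k sa sk p (j + 1) := by
    rw [extendJ, dif_pos ⟨h1, h2⟩]
  have hge : j + 1 ≤ extendJ x k sa sk p (j + 1) :=
    extendJ_ge x k sa sk p (k.length - (j + 1)) (j + 1) (le_refl _)
  rw [pLoop_unfold x k sa sk p (j + 1) (max best ((p : Int) + ((j : Int) + 1))),
    pLoop_unfold x k sa sk p j best, hj]
  have hbe : (if max best ((p : Int) + ((j : Int) + 1)) <
        (p : Int) + ((extendJ x k sa sk p (j + 1) : Nat) : Int)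
      then (p : Int) + ((extendJ x k sa sk p (j + 1) : Nat) : Int)
      else max best ((p : Int) + ((j : Int) + 1)))
      = (if best < (p : Int) + ((extendJ x k sa sk p (j + 1) : Nat) : Int)
        then (p : Int) + ((extendJ x k sa sk p (j + 1) : Nat) : Int) else best) := by
    have : ((j : Int) + 1) ≤ ((extendJ x k sa sk p (j + 1) : Nat) : Int) := by
      exact_mod_cast hge
    rw [max_def]
    split_ifs <;> omega
  simp only [hbe]

-- the j-major walk and the p-major level scan agree (invariant: best ≥ p + j)
theorem jLoop_eq_pLoop (x : Int) (k sa sk : List Int) :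
    ∀ (n p j : Nat) (best : Int), (k.length - j) + p ≤ n →
      (p : Int) + (j : Int) ≤ best →
      jLoop x k sa sk p j best = pLoop x k sa sk p j best := by
  intro n
  induction n with
  | zero =>
    intro p j best hn hb
    rw [jLoop, if_neg (by omega)]
    exact (pLoop_const x k sa sk p j best (by omega) hb).symm
  | succ n ih =>
    intro p j best hn hb
    by_cases hjk : j < k.length
    · rw [jLoop, if_pos hjk]
      by_cases hc : sa.getD p 0 + sk.getD (j + 1) 0 ≤ x
      · rw [if_pos hc,
          ih p (j + 1) (max best ((p : Int) + ((j : Int) + 1))) (by omega)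
            (by push_cast; omega),
          pLoop_shift x k sa sk p j best hjk hc]
      · rw [if_neg hc]
        by_cases hp0 : 0 < p
        · rw [if_pos hp0]
          obtain ⟨p', rfl⟩ : ∃ p', p = p' + 1 := ⟨p - 1, by omega⟩
          rw [show (p' + 1 - 1) = p' from rfl,
            ih p' j best (by omega) (by push_cast at hb ⊢; omega),
            pLoop_unfold x k sa sk (p' + 1) j best, if_neg (by omega : ¬ p' + 1 = 0),
            extendJ_stop x k sa sk (p' + 1) j (by tauto),
            if_neg (by push_cast at hb ⊢; omega)]
          simp only [Nat.add_sub_cancel]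
        · rw [if_neg hp0]
          have hp' : p = 0 := by omega
          subst hp'
          rw [pLoop_unfold, if_pos rfl, extendJ_stop x k sa sk 0 j (by tauto),
            if_neg (by push_cast at hb ⊢; omega)]
    · rw [jLoop, if_neg hjk]
      exact (pLoop_const x k sa sk p j best (by omega) hb).symm

-- the initial best may be 0 instead of p: the first level already records p + j'
theorem pLoop_init (x : Int) (k sa sk : List Int) (p : Nat) :
    pLoop x k sa sk p 0 ((p : Nat) : Int) = pLoop x k sa sk p 0 0 := by
  have hge : 0 ≤ extendJ x k sa sk p 0 :=
    extendJ_ge x k sa sk p (k.length - 0) 0 (le_refl _)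
  rw [pLoop_unfold x k sa sk p 0 (((p : Nat) : Int)), pLoop_unfold x k sa sk p 0 0]
  have hbe : (if ((p : Nat) : Int) < (p : Int) + ((extendJ x k sa sk p 0 : Nat) : Int)
      then (p : Int) + ((extendJ x k sa sk p 0 : Nat) : Int) else ((p : Nat) : Int))
      = (if (0 : Int) < (p : Int) + ((extendJ x k sa sk p 0 : Nat) : Int)
        then (p : Int) + ((extendJ x k sa sk p 0 : Nat) : Int) else 0) := by
    have h0 : (0 : Int) ≤ ((extendJ x k sa sk p 0 : Nat) : Int) := by positivity
    have h1 : (0 : Int) ≤ ((p : Nat) : Int) := by positivity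
    split_ifs <;> omega
  rw [hbe]

-- ===== VERDICT (by name: the statement is the Claim_ definition above) =====
theorem twoStacks_spec : Claim_equal_twoStacks := by
  intro x a k _
  unfold Spec_twoStacks twoStacks twoStacks_alt
  have hg := greedy_spec x a []
  simp only [List.length_nil, Nat.cast_zero, List.sum_nil] at hg
  rw [hg]
  have hsa := sa_spec x a []
  have hsk := sk_spec k []
  have hnil : psums ([] : List Int) = [0] := by simp [psums]
  rw [hnil] at hsa
  simp only [List.sum_nil, hnil, List.nil_append] at hsa hsk
  simp only [hsa, hsk, psums_length]
  have h := loop_eq x k (gpre x a []) (k.length + (gpre x a []).length)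
      (gpre x a []).length 0 ((gpre x a []).length : Int) [] (by omega) (le_refl _) (by omega)
      (by simp)
  have h2 := jLoop_eq_pLoop x k (psums (gpre x a [])) (psums k)
      (k.length + (gpre x a []).length) (gpre x a []).length 0
      ((gpre x a []).length : Int) (by omega) (by simp)
  have h3 := pLoop_init x k (psums (gpre x a [])) (psums k) (gpre x a []).length
  simp only [Nat.add_sub_cancel]
  simpa using h.trans (h2.trans h3)
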